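-- pv_equiv track=rewrite | github.com/ategt/katas | 4_by_4_skyscrapers.py | visible
-- ===== SOURCE A (Python) =====
-- def visible(tower_list):
--     current_tallest_height = 0
--     tower_visible_count = 0
--
--     for tower_height in tower_list:
--         if tower_height > current_tallest_height:
--             tower_visible_count += 1
--             current_tallest_height = tower_height
--
--     return tower_visible_count
-- ===== SOURCE B (Python) =====
-- def visible(tower_list):
--     # build the running-maximum table with a 0 baseline, then count strict increases
--     peaks = [0]
--     for h in tower_list:
--         peaks.append(max(peaks[-1], h))
--     return sum(1 for prev, cur in zip(peaks, peaks[1:]) if cur > prev)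
-- ===== Notes on version B (the rewrite author's own statement) =====
-- stated objective: alternative
-- what changed: Replaces the fused running-max-and-count loop by two passes: first materialise the prefix-maximum table (baseline 0), then count positions where that table strictly increases.
import Mathlib
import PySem

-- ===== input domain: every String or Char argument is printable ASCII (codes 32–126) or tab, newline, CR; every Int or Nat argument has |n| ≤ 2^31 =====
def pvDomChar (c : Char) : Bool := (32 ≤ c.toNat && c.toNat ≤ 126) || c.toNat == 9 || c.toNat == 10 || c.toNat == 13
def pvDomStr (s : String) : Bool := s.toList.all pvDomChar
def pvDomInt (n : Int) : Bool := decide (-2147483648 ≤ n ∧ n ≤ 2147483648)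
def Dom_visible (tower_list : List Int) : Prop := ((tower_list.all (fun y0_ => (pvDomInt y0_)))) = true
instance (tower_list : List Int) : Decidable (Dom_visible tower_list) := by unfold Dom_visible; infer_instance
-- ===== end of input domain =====

-- B replaces the fused running-max loop by building the prefix-max table and counting its strict increases; same result, alternative decomposition.


-- ===== PORT A =====
-- A's loop: state (current_tallest_height, tower_visible_count)
def visibleLoop : List Int → Int → Int → Int
  | [], _, count => count
  | h :: t, tallest, count =>
      if h > tallest then visibleLoop t h (count + 1)
      else visibleLoop t tallest count

def visible (tower_list : List Int) : Int := visibleLoop tower_list 0 0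

-- ===== PORT B =====
-- peaks = [0]; for h: peaks.append(max(peaks[-1], h))   (m is the current last element)
def buildPeaks : Int → List Int → List Int
  | m, [] => [m]
  | m, h :: t => m :: buildPeaks (max m h) t

-- sum(1 for prev, cur in zip(peaks, peaks[1:]) if cur > prev)
def countIncr : List Int → Int
  | a :: b :: t => (if b > a then 1 else 0) + countIncr (b :: t)
  | _ => 0

def visible_alt (tower_list : List Int) : Int := countIncr (buildPeaks 0 tower_list)

-- ===== PRECONDITION & SPEC =====
def Spec_visible (tower_list : List Int) (out : Int) : Prop := out = visible_alt tower_list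
instance (tower_list : List Int) (out : Int) : Decidable (Spec_visible tower_list out) := by unfold Spec_visible; infer_instance

-- ===== CLAIM (what is proved, stated in full; the proofs are below) =====
def Claim_equal_visible : Prop := ∀ (tower_list : List Int), Dom_visible tower_list → Spec_visible tower_list (visible tower_list)

-- ===== LEMMAS AND PROOFS =====
theorem countIncr_cons_build (t : List Int) (m x : Int) :
    countIncr (m :: buildPeaks x t) = (if x > m then 1 else 0) + countIncr (buildPeaks x t) := by
  cases t <;> simp [buildPeaks, countIncr]

theorem visibleLoop_eq (l : List Int) : ∀ (m c : Int),
    visibleLoop l m c = c + countIncr (buildPeaks m l) := by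
  induction l with
  | nil => intro m c; simp [visibleLoop, buildPeaks, countIncr]
  | cons h t ih =>
    intro m c
    simp only [visibleLoop, buildPeaks, countIncr_cons_build]
    by_cases hmh : h > m
    · have : max m h = h := by omega
      rw [this, ih]
      simp [hmh]; ring
    · have : max m h = m := by omega
      simp [this, hmh, ih]

-- ===== VERDICT (by name: the statement is the Claim_ definition above) =====
theorem visible_spec : Claim_equal_visible := by
  intro l _
  show visible l = visible_alt l
  simp [visible, visible_alt, visibleLoop_eq]
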